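-- pv_equiv track=rewrite | github.com/xushuhere/addMinusMulDiv | mathProblem.py | wrapInTab
-- ===== SOURCE A (Python) =====
-- def wrapInTab(result, lst):
--     tableText = '<p></p>'
--     tableText = tableText + '<p></p>'
--     tableText = tableText + '<p>  Name: _______   Date: ___________   Score: _______</p>'
--     tableText = tableText + '<p></p>'
--     tableText = tableText + '<p></p>'
--     tableText = tableText+ '<style>table, th, td {border: 1px dash black; border-spacing: 10px; align: right }</style>' + '<table ><tr>'
--     count = 0
--     for j in lst:
--         if count >=5:
--             tableText = tableText + '</tr> <tr>'
--             count = 0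
--         count+=1
--         tableText = tableText + '<td align="right">' + result[j][0]+ result[j][1]+ result[j][2]+ result[j][3] + '</td>'
--
--     tableText = tableText + '</tr></table>'
--     return tableText
-- ===== SOURCE B (Python) =====
-- def wrapInTab(result, lst):
--     header = ('<p></p><p></p>'
--               '<p>  Name: _______   Date: ___________   Score: _______</p>'
--               '<p></p><p></p>'
--               '<style>table, th, td {border: 1px dash black; border-spacing: 10px; align: right }</style>')
--     cells = ['<td align="right">' + result[j][0] + result[j][1] + result[j][2] + result[j][3] + '</td>'
--              for j in lst]
--     rows = []
--     while cells:
--         rows.append(''.join(cells[:5]))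
--         cells = cells[5:]
--     return header + '<table ><tr>' + '</tr> <tr>'.join(rows) + '</tr></table>'
-- ===== Notes on version B (the rewrite author's own statement) =====
-- stated objective: simpler
-- what changed: B builds the per-element cell strings as a list, chunks it into rows of 5 and joins the rows, instead of A's running counter with in-loop row-break logic.
import Mathlib
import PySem

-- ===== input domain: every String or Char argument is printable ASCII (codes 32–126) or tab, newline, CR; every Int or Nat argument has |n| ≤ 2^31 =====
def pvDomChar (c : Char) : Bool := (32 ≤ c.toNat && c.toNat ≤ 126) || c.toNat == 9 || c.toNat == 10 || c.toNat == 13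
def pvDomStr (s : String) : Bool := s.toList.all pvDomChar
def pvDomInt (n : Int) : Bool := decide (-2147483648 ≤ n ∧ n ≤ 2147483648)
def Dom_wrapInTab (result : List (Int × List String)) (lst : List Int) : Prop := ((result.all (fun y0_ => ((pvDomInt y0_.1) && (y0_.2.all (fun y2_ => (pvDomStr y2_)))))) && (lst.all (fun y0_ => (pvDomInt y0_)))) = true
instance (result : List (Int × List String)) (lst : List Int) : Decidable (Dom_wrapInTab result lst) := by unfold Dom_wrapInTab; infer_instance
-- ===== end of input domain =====

-- B replaces A's running counter with in-loop row-break logic by building the cell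
-- strings as a list, chunking it into rows of 5 and joining the rows (objective: simpler).

-- The fixed header both programs assemble the same way.
def pvHeader : String :=
  "<p></p>" ++ "<p></p>" ++ "<p>  Name: _______   Date: ___________   Score: _______</p>"
    ++ "<p></p>" ++ "<p></p>"
    ++ "<style>table, th, td {border: 1px dash black; border-spacing: 10px; align: right }</style>"

-- ===== PORT A =====
-- One iteration of A's loop; state = some (tableText, count), none = the loop raised
-- (KeyError for a missing key j, IndexError if result[j] has fewer than 4 entries).
def wrapInTabStep (result : List (Int × List String)) (st : Option (String × Int)) (j : Int) :
    Option (String × Int) :=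
  match st with
  | none => none
  | some (tableText, count) =>
    let (tableText, count) :=
      if count ≥ 5 then (tableText ++ "</tr> <tr>", (0 : Int)) else (tableText, count)
    let count := count + 1
    match (PySem.Dict.mk result).get? j with
    | none => none                      -- KeyError: j not a key of result
    | some v =>
      match PySem.List.pyGet? v 0, PySem.List.pyGet? v 1, PySem.List.pyGet? v 2, PySem.List.pyGet? v 3 with
      | some a, some b, some c, some d =>
          some (tableText ++ "<td align=\"right\">" ++ a ++ b ++ c ++ d ++ "</td>", count)
      | _, _, _, _ => none              -- IndexError: result[j] shorter than 4

def wrapInTab (result : List (Int × List String)) (lst : List Int) : String :=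
  match lst.foldl (wrapInTabStep result) (some (pvHeader ++ "<table ><tr>", (0 : Int))) with
  | some (tableText, _) => tableText ++ "</tr></table>"
  | none => ""                          -- unreachable under Pre_wrapInTab (Python raised)

-- ===== PORT B =====
-- One cell string of B's comprehension; none = that element raised (same KeyError /
-- IndexError as A's loop body).
def pvCell (result : List (Int × List String)) (j : Int) : Option String :=
  match (PySem.Dict.mk result).get? j with
  | none => none                        -- KeyError
  | some v =>
    match PySem.List.pyGet? v 0, PySem.List.pyGet? v 1, PySem.List.pyGet? v 2, PySem.List.pyGet? v 3 with
    | some a, some b, some c, some d =>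
        some ("<td align=\"right\">" ++ a ++ b ++ c ++ d ++ "</td>")
    | _, _, _, _ => none                -- IndexError

-- B's while-loop: rows.append(''.join(cells[:5])); cells = cells[5:]
def pvChunkRows (cells : List String) : List String :=
  if h : cells = [] then []
  else
    PySem.Str.join "" (PySem.List.slice cells none (some 5))
      :: pvChunkRows (PySem.List.slice cells (some 5) none)
termination_by cells.length
decreasing_by
  rw [PySem.List.slice_from cells (by omega)]
  have : cells.length ≠ 0 := fun hz => h (List.eq_nil_of_length_eq_zero hz)
  simp only [List.length_drop]
  omega

def wrapInTab_alt (result : List (Int × List String)) (lst : List Int) : String :=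
  match lst.mapM (pvCell result) with
  | none => ""                          -- unreachable under Pre_wrapInTab (Python raised)
  | some cells =>
    pvHeader ++ "<table ><tr>"
      ++ PySem.Str.join "</tr> <tr>" (pvChunkRows cells) ++ "</tr></table>"

-- ===== PRECONDITION & SPEC =====
-- Pre_ excludes exactly the inputs on which A raises: some j in lst is not a key of
-- result (KeyError) or its list of strings has fewer than 4 entries (IndexError).
def Pre_wrapInTab (result : List (Int × List String)) (lst : List Int) : Prop :=
  (lst.all fun j =>
    match (PySem.Dict.mk result).get? j with
    | some v => decide (4 ≤ v.length)
    | none => false) = true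
instance (result : List (Int × List String)) (lst : List Int) : Decidable (Pre_wrapInTab result lst) := by
  unfold Pre_wrapInTab; infer_instance

def pvWitness_wrapInTab : (List (Int × List String)) × List Int :=
  ([(0, ["3", " + ", "4", " = "]), (1, ["8", " - ", "5", " = "])], [0, 1, 0, 1, 0, 1, 0])

def Spec_wrapInTab (result : List (Int × List String)) (lst : List Int) (out : String) : Prop := out = wrapInTab_alt result lst
instance (result : List (Int × List String)) (lst : List Int) (out : String) : Decidable (Spec_wrapInTab result lst out) := by unfold Spec_wrapInTab; infer_instance

-- ===== CLAIM (what is proved, stated in full; the proofs are below) =====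
def Claim_equal_wrapInTab : Prop := ∀ (result : List (Int × List String)) (lst : List Int), Dom_wrapInTab result lst → Pre_wrapInTab result lst → Spec_wrapInTab result lst (wrapInTab result lst)

-- ===== LEMMAS AND PROOFS =====

-- A's loop body on a pure state, once the cell string s of the element is known.
def pvPureStep (st : String × Int) (s : String) : String × Int :=
  let (t, c) := if st.2 ≥ 5 then (st.1 ++ "</tr> <tr>", (0 : Int)) else st
  (t ++ s, c + 1)

theorem pv_join_cons {sep x : String} {xs : List String} (h : xs ≠ []) :
    PySem.Str.join sep (x :: xs) = x ++ sep ++ PySem.Str.join sep xs := by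
  cases xs with
  | nil => exact absurd rfl h
  | cons y ys =>
    simp [PySem.Str.join, PySem.Chars.join, List.intercalate, String.append_assoc]

theorem pv_join_empty_cons (x : String) (xs : List String) :
    PySem.Str.join "" (x :: xs) = x ++ PySem.Str.join "" xs := by
  cases xs with
  | nil => simp [PySem.Str.join, PySem.Chars.join, List.intercalate]
  | cons y ys =>
    simp [PySem.Str.join, PySem.Chars.join, List.intercalate]

-- Pre_ makes every cell succeed.
theorem pv_cell_some {result : List (Int × List String)} {lst : List Int}
    (hpre : Pre_wrapInTab result lst) {j : Int} (hj : j ∈ lst) :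
    ∃ s, pvCell result j = some s := by
  unfold Pre_wrapInTab at hpre
  rw [List.all_eq_true] at hpre
  have hjv := hpre j hj
  unfold pvCell
  cases hget : (PySem.Dict.mk result).get? j with
  | none => rw [hget] at hjv; simp at hjv
  | some v =>
    rw [hget] at hjv
    simp only [decide_eq_true_eq] at hjv
    have h0 : PySem.List.pyGet? v 0 = some v[0] := by
      rw [show (0 : Int) = ((0 : Nat) : Int) from rfl, PySem.List.pyGet?_natCast]
      exact List.getElem?_eq_getElem (by omega)
    have h1 : PySem.List.pyGet? v 1 = some v[1] := by
      rw [show (1 : Int) = ((1 : Nat) : Int) from rfl, PySem.List.pyGet?_natCast]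
      exact List.getElem?_eq_getElem (by omega)
    have h2 : PySem.List.pyGet? v 2 = some v[2] := by
      rw [show (2 : Int) = ((2 : Nat) : Int) from rfl, PySem.List.pyGet?_natCast]
      exact List.getElem?_eq_getElem (by omega)
    have h3 : PySem.List.pyGet? v 3 = some v[3] := by
      rw [show (3 : Int) = ((3 : Nat) : Int) from rfl, PySem.List.pyGet?_natCast]
      exact List.getElem?_eq_getElem (by omega)
    simp only [h0, h1, h2, h3]
    exact ⟨_, rfl⟩

-- A's step agrees with pvPureStep on the cell value.
theorem pv_step_eq {result : List (Int × List String)} {j : Int} {s : String}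
    (hc : pvCell result j = some s) (st : String × Int) :
    wrapInTabStep result (some st) j = some (pvPureStep st s) := by
  obtain ⟨t, c⟩ := st
  unfold pvCell at hc
  cases hget : (PySem.Dict.mk result).get? j with
  | none => simp only [hget] at hc; exact absurd hc (by simp)
  | some v =>
    simp only [hget] at hc
    cases h0 : PySem.List.pyGet? v 0 with
    | none => simp only [h0] at hc; exact absurd hc (by simp)
    | some a =>
    cases h1 : PySem.List.pyGet? v 1 with
    | none => simp only [h0, h1] at hc; exact absurd hc (by simp)
    | some b =>
    cases h2 : PySem.List.pyGet? v 2 with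
    | none => simp only [h0, h1, h2] at hc; exact absurd hc (by simp)
    | some c' =>
    cases h3 : PySem.List.pyGet? v 3 with
    | none => simp only [h0, h1, h2, h3] at hc; exact absurd hc (by simp)
    | some d =>
      simp only [h0, h1, h2, h3, Option.some.injEq] at hc
      subst hc
      simp only [wrapInTabStep, hget, h0, h1, h2, h3]
      by_cases h5 : c ≥ 5
      · simp only [pvPureStep, h5, if_pos, Option.some.injEq]
        simp only [String.append_assoc]
      · simp [pvPureStep, h5, String.append_assoc]

-- Under a successful mapM, A's Option-fold is the pure fold over the cell list.
theorem pv_foldl_eq {result : List (Int × List String)} :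
    ∀ (lst : List Int) (cells : List String),
      lst.mapM (pvCell result) = some cells →
      ∀ st : String × Int,
        lst.foldl (wrapInTabStep result) (some st) = some (cells.foldl pvPureStep st) := by
  intro lst
  induction lst with
  | nil => intro cells h st; simp_all
  | cons j rest ih =>
    intro cells h st
    rw [List.mapM_cons] at h
    cases hc : pvCell result j with
    | none => rw [hc] at h; simp at h
    | some s =>
      rw [hc] at h
      cases hrest : rest.mapM (pvCell result) with
      | none => rw [hrest] at h; simp at h
      | some cs =>
        rw [hrest] at h
        simp only [Option.bind_eq_bind, Option.bind_some, Option.some.injEq,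
          Option.pure_def] at h
        have hcells : cells = s :: cs := by
          cases h' : h; rfl
        subst hcells
        rw [List.foldl_cons, List.foldl_cons, pv_step_eq hc st]
        exact ih cs hrest _

-- Row-capacity invariant of the pure fold: with k slots left in the current row,
-- the fold either finishes inside the row or fills it and continues at count 5.
theorem pv_fold_row :
    ∀ (cells : List String) (k : Nat), k ≤ 5 → ∀ t : String,
      cells.foldl pvPureStep (t, 5 - (k : Int)) =
        if cells.length ≤ k then (t ++ PySem.Str.join "" cells, 5 - (k : Int) + cells.length)
        else (cells.drop k).foldl pvPureStep (t ++ PySem.Str.join "" (cells.take k), (5 : Int)) := by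
  intro cells
  induction cells with
  | nil =>
    intro k hk t
    simp [PySem.Str.join, PySem.Chars.join, List.intercalate]
  | cons s rest ih =>
    intro k hk t
    cases k with
    | zero =>
      simp [PySem.Str.join, PySem.Chars.join, List.intercalate]
    | succ k' =>
      have hstep : pvPureStep (t, 5 - ((k' + 1 : Nat) : Int)) s = (t ++ s, 5 - (k' : Int)) := by
        unfold pvPureStep
        have : ¬ (5 - ((k' + 1 : Nat) : Int) ≥ 5) := by push_cast; omega
        simp only [this, if_false]
        simp only [Prod.mk.injEq]
        constructor <;> first | trivial | (push_cast; omega)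
      rw [List.foldl_cons, hstep, ih k' (by omega) (t ++ s)]
      simp only [List.length_cons]
      by_cases hlen : rest.length ≤ k'
      · rw [if_pos hlen, if_pos (by omega : rest.length + 1 ≤ k' + 1)]
        simp only [Prod.mk.injEq]
        refine ⟨?_, by push_cast; omega⟩
        rw [pv_join_empty_cons, ← String.append_assoc]
      · rw [if_neg hlen, if_neg (by omega : ¬ rest.length + 1 ≤ k' + 1),
          List.drop_succ_cons, List.take_succ_cons, pv_join_empty_cons, ← String.append_assoc]

-- Restarting a row: a fold from count 5 on a nonempty list first emits the break.
theorem pv_fold_break (cells : List String) (h : cells ≠ []) (t : String) :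
    cells.foldl pvPureStep (t, (5 : Int)) = cells.foldl pvPureStep (t ++ "</tr> <tr>", (0 : Int)) := by
  cases cells with
  | nil => exact absurd rfl h
  | cons s rest =>
    rw [List.foldl_cons, List.foldl_cons]
    have hst : pvPureStep (t, (5 : Int)) s = pvPureStep (t ++ "</tr> <tr>", (0 : Int)) s := by
      unfold pvPureStep
      norm_num
    rw [hst]

theorem pv_chunkRows_ne_nil {cells : List String} (h : cells ≠ []) : pvChunkRows cells ≠ [] := by
  rw [pvChunkRows]
  simp [h]

-- Main pure lemma: A's fold from count 0 is B's chunk-join.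
theorem pv_fold_chunks :
    ∀ (cells : List String) (t : String),
      (cells.foldl pvPureStep (t, (0 : Int))).1 =
        t ++ PySem.Str.join "</tr> <tr>" (pvChunkRows cells) := by
  intro cells
  induction hn : cells.length using Nat.strong_induction_on generalizing cells with
  | _ n ih =>
  intro t
  have h5 : (0 : Int) = 5 - ((5 : Nat) : Int) := by norm_num
  rw [h5, pv_fold_row cells 5 (by omega) t]
  by_cases hlen : cells.length ≤ 5
  · rw [if_pos hlen]
    by_cases hcne : cells = []
    · subst hcne
      simp [pvChunkRows, PySem.Str.join, PySem.Chars.join, List.intercalate]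
    · rw [pvChunkRows, dif_neg hcne,
        PySem.List.slice_from cells (by omega), PySem.List.slice_to cells (by omega),
        List.drop_eq_nil_of_le (by omega : cells.length ≤ (5 : Int).toNat),
        List.take_of_length_le (by omega : cells.length ≤ (5 : Int).toNat),
        pvChunkRows]
      simp [PySem.Str.join, PySem.Chars.join, List.intercalate]
  · rw [if_neg hlen]
    have hdropne : cells.drop 5 ≠ [] := by
      have : (cells.drop 5).length = cells.length - 5 := List.length_drop ..
      intro hnil
      rw [hnil] at this
      simp at this
      omega
    have h5t : ((5 : Int)).toNat = 5 := rfl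
    rw [pv_fold_break _ hdropne, ih (cells.drop 5).length (by rw [List.length_drop]; omega) _ rfl]
    have hcne : cells ≠ [] := by intro h; rw [h] at hlen; simp at hlen
    conv_rhs => rw [pvChunkRows]
    rw [dif_neg hcne,
      PySem.List.slice_from cells (by omega), PySem.List.slice_to cells (by omega), h5t]
    rw [pv_join_cons (pv_chunkRows_ne_nil hdropne)]
    simp [String.append_assoc]

-- Pre_ implies the comprehension succeeds.
theorem pv_mapM_some {result : List (Int × List String)} :
    ∀ {lst : List Int}, Pre_wrapInTab result lst →
      ∃ cells, lst.mapM (pvCell result) = some cells := by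
  intro lst hpre
  induction lst with
  | nil => exact ⟨[], rfl⟩
  | cons j rest ih =>
    have hj : ∃ s, pvCell result j = some s := pv_cell_some hpre (by simp)
    have hrest : Pre_wrapInTab result rest := by
      unfold Pre_wrapInTab at hpre ⊢
      rw [List.all_eq_true] at hpre ⊢
      exact fun x hx => hpre x (by simp [hx])
    obtain ⟨s, hs⟩ := hj
    obtain ⟨cs, hcs⟩ := ih hrest
    exact ⟨s :: cs, by rw [List.mapM_cons, hs, hcs]; rfl⟩

-- ===== VERDICT (by name: the statement is the Claim_ definition above) =====
theorem wrapInTab_spec : Claim_equal_wrapInTab := by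
  intro result lst _ hpre
  obtain ⟨cells, hcells⟩ := pv_mapM_some hpre
  unfold Spec_wrapInTab wrapInTab wrapInTab_alt
  rw [hcells, pv_foldl_eq lst cells hcells (pvHeader ++ "<table ><tr>", 0)]
  have h := pv_fold_chunks cells (pvHeader ++ "<table ><tr>")
  cases hfold : cells.foldl pvPureStep (pvHeader ++ "<table ><tr>", 0) with
  | mk T C =>
    rw [hfold] at h
    simp only at h ⊢
    rw [h]
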